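-- pv_equiv track=rewrite | github.com/BeechburgPieStar/CDFNet_RFF | main.py | split_receivers
-- ===== SOURCE A (Python) =====
-- def split_receivers(all_num=12, all_test_round=4, test_round=0):
--     if not (0 <= test_round < all_test_round):
--         raise ValueError(f"test_round {test_round} not in [0, {all_test_round-1}]")
--     if all_num % all_test_round != 0:
--         raise ValueError(f"total rx num {all_num} not divisible by rounds {all_test_round}")
--
--     receivers = list(range(all_num))
--     per_round = all_num // all_test_round
--     start = test_round * per_round
--     end = all_num if test_round == all_test_round - 1 else start + per_round
--     test = receivers[start:end]
--     train = [r for r in receivers if r not in test]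
--     return train, test
-- ===== SOURCE B (Python) =====
-- def split_receivers(all_num=12, all_test_round=4, test_round=0):
--     if not (0 <= test_round < all_test_round):
--         raise ValueError(f"test_round {test_round} not in [0, {all_test_round-1}]")
--     if all_num % all_test_round != 0:
--         raise ValueError(f"total rx num {all_num} not divisible by rounds {all_test_round}")
--
--     per_round = all_num // all_test_round
--     start = test_round * per_round
--     end = all_num if test_round == all_test_round - 1 else start + per_round
--     train = list(range(start)) + list(range(end, all_num))
--     test = list(range(start, end))
--     return train, test
-- ===== Notes on version B (the rewrite author's own statement) =====
-- stated objective: faster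
-- what changed: B never builds the receivers list at all: the O(n*k) membership-scan comprehension is gone, and train/test are generated directly as three ranges (range(start), range(end, all_num), range(start, end)) computed from the fold arithmetic.
import Mathlib
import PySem

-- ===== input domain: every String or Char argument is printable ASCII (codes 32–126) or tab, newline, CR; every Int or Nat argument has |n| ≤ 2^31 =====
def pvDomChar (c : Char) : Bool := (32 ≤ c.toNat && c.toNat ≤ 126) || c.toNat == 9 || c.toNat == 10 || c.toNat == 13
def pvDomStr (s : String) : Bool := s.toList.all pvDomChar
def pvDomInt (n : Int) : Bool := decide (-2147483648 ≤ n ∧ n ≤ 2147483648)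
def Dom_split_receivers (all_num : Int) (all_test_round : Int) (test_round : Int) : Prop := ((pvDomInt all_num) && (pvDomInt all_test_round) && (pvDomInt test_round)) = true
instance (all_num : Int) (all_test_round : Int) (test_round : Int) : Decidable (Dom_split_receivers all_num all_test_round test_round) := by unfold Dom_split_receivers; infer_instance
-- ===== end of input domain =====

-- B never builds the receivers list: the membership-scan comprehension of A is gone and
-- train/test are generated directly as three ranges from the index arithmetic.
-- Equivalence proved on Pre_ (exactly where A does not raise ValueError).

-- ===== PORT A =====
def split_receivers (all_num : Int) (all_test_round : Int) (test_round : Int) : List Int × List Int :=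
  let receivers := PySem.List.pyRange 0 all_num 1
  let per_round := PySem.Int.floordiv all_num all_test_round
  let start := test_round * per_round
  let stop := if test_round = all_test_round - 1 then all_num else start + per_round
  let test := PySem.List.slice receivers (some start) (some stop)
  let train := receivers.filter (fun r => !(test.contains r))
  (train, test)

-- ===== PORT B =====
def split_receivers_alt (all_num : Int) (all_test_round : Int) (test_round : Int) : List Int × List Int :=
  let per_round := PySem.Int.floordiv all_num all_test_round
  let start := test_round * per_round
  let stop := if test_round = all_test_round - 1 then all_num else start + per_round
  (PySem.List.pyRange 0 start 1 ++ PySem.List.pyRange stop all_num 1,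
   PySem.List.pyRange start stop 1)

-- ===== PRECONDITION & SPEC =====
-- Pre_ = exactly the inputs where the Python A returns (it raises ValueError otherwise).
def Pre_split_receivers (all_num : Int) (all_test_round : Int) (test_round : Int) : Prop :=
  0 ≤ test_round ∧ test_round < all_test_round ∧ PySem.Int.mod all_num all_test_round = 0

instance (all_num : Int) (all_test_round : Int) (test_round : Int) : Decidable (Pre_split_receivers all_num all_test_round test_round) := by unfold Pre_split_receivers; infer_instance

def pvWitness_split_receivers : Int × Int × Int := (12, 4, 1)

def Spec_split_receivers (all_num : Int) (all_test_round : Int) (test_round : Int) (out : List Int × List Int) : Prop := out = split_receivers_alt all_num all_test_round test_round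
instance (all_num : Int) (all_test_round : Int) (test_round : Int) (out : List Int × List Int) : Decidable (Spec_split_receivers all_num all_test_round test_round out) := by unfold Spec_split_receivers; infer_instance

-- ===== CLAIM (what is proved, stated in full; the proofs are below) =====
def Claim_equal_split_receivers : Prop := ∀ (all_num : Int) (all_test_round : Int) (test_round : Int), Dom_split_receivers all_num all_test_round test_round → Pre_split_receivers all_num all_test_round test_round → Spec_split_receivers all_num all_test_round test_round (split_receivers all_num all_test_round test_round)

-- ===== LEMMAS AND PROOFS =====

-- A contiguous slice of range(n) is itself a range.
lemma slice_range_window (n s e : Int) (h0 : 0 ≤ s) (hse : s ≤ e) (hen : e ≤ n) :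
    PySem.List.slice (PySem.List.pyRange 0 n 1) (some s) (some e) = PySem.List.pyRange s e 1 := by
  have hsplit1 : PySem.List.pyRange 0 n 1
      = PySem.List.pyRange 0 s 1 ++ PySem.List.pyRange s n 1 :=
    PySem.List.pyRange_one_append 0 s n h0 (le_trans hse hen)
  have hsplit2 : PySem.List.pyRange s n 1
      = PySem.List.pyRange s e 1 ++ PySem.List.pyRange e n 1 :=
    PySem.List.pyRange_one_append s e n hse hen
  have hlen1 : (PySem.List.pyRange 0 s 1).length = s.toNat := by
    rw [PySem.List.length_pyRange_one]; omega
  have hlen2 : (PySem.List.pyRange s e 1).length = e.toNat - s.toNat := by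
    rw [PySem.List.length_pyRange_one]; omega
  have hdrop : (PySem.List.pyRange 0 n 1).drop s.toNat = PySem.List.pyRange s n 1 := by
    rw [hsplit1, List.drop_append_of_le_length (by omega),
        List.drop_of_length_le (by omega), List.nil_append]
  rw [PySem.List.slice_toNat _ h0 (le_trans h0 hse), hdrop, hsplit2,
      List.take_append_of_le_length (by omega)]
  rw [List.take_of_length_le (by omega)]

-- On range(n), filtering out a contiguous window leaves the prefix and suffix ranges.
lemma filter_not_window (n s e : Int) (h0 : 0 ≤ s) (hse : s ≤ e) (hen : e ≤ n) :
    (PySem.List.pyRange 0 n 1).filter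
        (fun r => !((PySem.List.slice (PySem.List.pyRange 0 n 1) (some s) (some e)).contains r))
      = PySem.List.pyRange 0 s 1 ++ PySem.List.pyRange e n 1 := by
  rw [slice_range_window n s e h0 hse hen]
  nth_rewrite 1 [PySem.List.pyRange_one_append 0 s n h0 (le_trans hse hen),
    PySem.List.pyRange_one_append s e n hse hen]
  rw [List.filter_append, List.filter_append]
  have hmem : ∀ r : Int, (PySem.List.pyRange s e 1).contains r = decide (s ≤ r ∧ r < e) := by
    intro r; simp [PySem.List.mem_pyRange_one]
  have h1 : (PySem.List.pyRange 0 s 1).filter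
      (fun r => !((PySem.List.pyRange s e 1).contains r)) = PySem.List.pyRange 0 s 1 := by
    apply List.filter_eq_self.mpr
    intro r hr
    rw [PySem.List.mem_pyRange_one] at hr
    rw [hmem]; simp; omega
  have h2 : (PySem.List.pyRange s e 1).filter
      (fun r => !((PySem.List.pyRange s e 1).contains r)) = [] := by
    apply List.filter_eq_nil_iff.mpr
    intro r hr
    rw [PySem.List.mem_pyRange_one] at hr
    rw [hmem]; simp; omega
  have h3 : (PySem.List.pyRange e n 1).filter
      (fun r => !((PySem.List.pyRange s e 1).contains r)) = PySem.List.pyRange e n 1 := by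
    apply List.filter_eq_self.mpr
    intro r hr
    rw [PySem.List.mem_pyRange_one] at hr
    rw [hmem]; simp; omega
  rw [h1, h2, h3]
  simp

lemma slice_nil_eq (a b : Option Int) : PySem.List.slice ([] : List Int) a b = [] := by
  cases a <;> cases b <;> simp [PySem.List.slice]

-- ===== VERDICT (by name: the statement is the Claim_ definition above) =====
theorem split_receivers_spec : Claim_equal_split_receivers := by
  intro n atr t _ ⟨ht0, htlt, hmod⟩
  unfold Spec_split_receivers split_receivers split_receivers_alt
  have hatr : 0 < atr := by omega
  have hdvd : atr ∣ n := (PySem.Int.mod_eq_zero_iff_dvd n atr).mp hmod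
  obtain ⟨q, hq⟩ := hdvd
  have hper : PySem.Int.floordiv n atr = q := by
    rw [PySem.Int.floordiv_eq_iff_of_pos hatr]
    constructor <;> nlinarith
  simp only [hper]
  set s := t * q with hs
  by_cases hn : n ≤ 0
  · -- receivers is empty, and all three of B's ranges are empty as well
    have hq0 : q ≤ 0 := by nlinarith
    have hs0 : s ≤ 0 := by rw [hs]; nlinarith
    have hnil : PySem.List.pyRange 0 n 1 = [] := PySem.List.pyRange_one_eq_nil hn
    have hb1 : PySem.List.pyRange 0 s 1 = [] := PySem.List.pyRange_one_eq_nil hs0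
    have hstop : ∀ stop : Int, stop = (if t = atr - 1 then n else s + q) →
        PySem.List.pyRange stop n 1 = [] ∧ PySem.List.pyRange s stop 1 = [] := by
      intro stop hstopdef
      by_cases hlast : t = atr - 1
      · rw [if_pos hlast] at hstopdef
        subst hstopdef
        refine ⟨PySem.List.pyRange_one_eq_nil le_rfl, PySem.List.pyRange_one_eq_nil ?_⟩
        rw [hs, hlast]; nlinarith
      · rw [if_neg hlast] at hstopdef
        subst hstopdef
        refine ⟨PySem.List.pyRange_one_eq_nil ?_, PySem.List.pyRange_one_eq_nil (by omega)⟩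
        have : t + 1 ≤ atr := by omega
        calc n = atr * q := hq
          _ ≤ (t + 1) * q := by nlinarith
          _ = s + q := by rw [hs]; ring
    obtain ⟨hb2, hb3⟩ := hstop _ rfl
    simp only [hnil, slice_nil_eq, List.filter_nil, hb1, hb2, hb3, List.append_nil]
  · push Not at hn
    have hq0 : 0 < q := by nlinarith
    have hstart : 0 ≤ s := by rw [hs]; positivity
    by_cases hlast : t = atr - 1
    · simp only [if_pos hlast]
      have hsn : s ≤ n := by rw [hs, hlast]; nlinarith
      rw [filter_not_window n s n hstart hsn le_rfl, slice_range_window n s n hstart hsn le_rfl]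
    · simp only [if_neg hlast]
      have hse : s ≤ s + q := by omega
      have hen : s + q ≤ n := by
        have : t + 1 ≤ atr - 1 := by omega
        calc s + q = (t + 1) * q := by rw [hs]; ring
          _ ≤ (atr - 1) * q := by nlinarith
          _ ≤ n := by nlinarith
      rw [filter_not_window n s (s + q) hstart hse hen,
          slice_range_window n s (s + q) hstart hse hen]
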